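-- pv_equiv track=rewrite | github.com/TaranRoth/torus-knots | invs/arf.py | get_arf
-- ===== SOURCE A (Python) =====
-- def get_arf(p: int, q: int):
--     if q % 2 == 1:
--         if p % 2 == 1 or q % 8 in [1, 7]:
--             return 0
--         if p % 2 == 0 and q % 8 in [3, 5]:
--             return 1
--     if p % 2 == 1:
--         return get_arf(q, p)
--     return None
-- ===== SOURCE B (Python) =====
-- def get_arf(p: int, q: int):
--     if p % 2 == 0 and q % 2 == 0:
--         return None
--     m = p if p % 2 else q
--     return (1 - p % 2 * (q % 2)) * ((m * m - 1) // 8 % 2)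
-- ===== Notes on version B (the rewrite author's own statement) =====
-- stated objective: alternative
-- what changed: Replaced the residue-membership case analysis with swap-recursion by a branch-minimal arithmetic closed form: after one both-even guard the answer is (1 - p%2*q%2) * ((m*m-1)//8 % 2) for the odd operand m, using the classical (m^2-1)/8 parity formula instead of testing m%8 against lists.
import Mathlib
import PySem

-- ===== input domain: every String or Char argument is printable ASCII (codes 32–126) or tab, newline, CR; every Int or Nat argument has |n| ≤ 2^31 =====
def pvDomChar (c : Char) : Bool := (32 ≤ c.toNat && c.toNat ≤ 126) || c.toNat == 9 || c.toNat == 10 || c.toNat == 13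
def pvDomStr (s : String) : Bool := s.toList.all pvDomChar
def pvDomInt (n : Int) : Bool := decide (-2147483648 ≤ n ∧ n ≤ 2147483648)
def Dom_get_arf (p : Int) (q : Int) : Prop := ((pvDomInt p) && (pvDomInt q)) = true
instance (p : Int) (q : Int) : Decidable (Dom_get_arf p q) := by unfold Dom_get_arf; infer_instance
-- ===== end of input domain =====

-- B replaces A's residue-list case analysis with swap-recursion by a one-guard
-- arithmetic closed form (1 - p%2*q%2) * ((m*m-1)//8 % 2) on the odd operand m;
-- objective: alternative.

-- termination helper for port A (cited in its decreasing_by)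
theorem pv_mod2 (a : Int) : PySem.Int.mod a 2 = a % 2 :=
  PySem.Int.mod_eq_emod_of_pos (by norm_num)

-- ===== PORT A =====
-- literal transliteration of A; the swap self-call recurses at most once (it is
-- only reached with p odd and q even, and then the swapped call returns directly)
def get_arf (p : Int) (q : Int) : Option Int :=
  if PySem.Int.mod q 2 = 1 ∧
      (PySem.Int.mod p 2 = 1 ∨ (PySem.Int.mod q 8 = 1 ∨ PySem.Int.mod q 8 = 7)) then
    some 0
  else if PySem.Int.mod q 2 = 1 ∧
      (PySem.Int.mod p 2 = 0 ∧ (PySem.Int.mod q 8 = 3 ∨ PySem.Int.mod q 8 = 5)) then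
    some 1
  else if PySem.Int.mod p 2 = 1 then
    get_arf q p
  else
    none
termination_by (if PySem.Int.mod q 2 = 1 then 0 else 1 : Nat)
decreasing_by
  rename_i h1 _ hp
  have hq : PySem.Int.mod q 2 ≠ 1 := fun hq => h1 ⟨hq, Or.inl hp⟩
  rw [pv_mod2] at hp hq
  simp [hp, hq]

-- ===== PORT B =====
def get_arf_alt (p : Int) (q : Int) : Option Int :=
  if PySem.Int.mod p 2 = 0 ∧ PySem.Int.mod q 2 = 0 then
    none
  else
    let m := if PySem.Int.mod p 2 ≠ 0 then p else q
    some ((1 - PySem.Int.mod p 2 * PySem.Int.mod q 2) *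
      PySem.Int.mod (PySem.Int.floordiv (m * m - 1) 8) 2)

-- ===== PRECONDITION & SPEC =====
def Spec_get_arf (p : Int) (q : Int) (out : Option Int) : Prop := out = get_arf_alt p q
instance (p : Int) (q : Int) (out : Option Int) : Decidable (Spec_get_arf p q out) := by unfold Spec_get_arf; infer_instance

-- ===== CLAIM =====
def Claim_equal_get_arf : Prop := ∀ (p : Int) (q : Int), Dom_get_arf p q → Spec_get_arf p q (get_arf p q)

-- ===== LEMMAS AND PROOFS =====

-- parity of (m^2-1)/8 for odd m, keyed on m % 8
theorem pv_arf_formula (m : Int) (hm : m % 2 = 1) :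
    (m * m - 1) / 8 % 2 = if m % 8 = 1 ∨ m % 8 = 7 then 0 else 1 := by
  have h8 : m % 8 = 1 ∨ m % 8 = 3 ∨ m % 8 = 5 ∨ m % 8 = 7 := by omega
  rcases h8 with h | h | h | h
  · rw [if_pos (Or.inl h)]
    obtain ⟨k, rfl⟩ : ∃ k, m = 8 * k + 1 := ⟨m / 8, by omega⟩
    rw [show (8 * k + 1) * (8 * k + 1) - 1 = (8 * k * k + 2 * k) * 8 by ring,
        Int.mul_ediv_cancel _ (by norm_num),
        show 8 * k * k + 2 * k = 0 + 2 * (4 * k * k + k) by ring,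
        Int.add_mul_emod_self_left]
    norm_num
  · rw [if_neg (by omega)]
    obtain ⟨k, rfl⟩ : ∃ k, m = 8 * k + 3 := ⟨m / 8, by omega⟩
    rw [show (8 * k + 3) * (8 * k + 3) - 1 = (8 * k * k + 6 * k + 1) * 8 by ring,
        Int.mul_ediv_cancel _ (by norm_num),
        show 8 * k * k + 6 * k + 1 = 1 + 2 * (4 * k * k + 3 * k) by ring,
        Int.add_mul_emod_self_left]
    norm_num
  · rw [if_neg (by omega)]
    obtain ⟨k, rfl⟩ : ∃ k, m = 8 * k + 5 := ⟨m / 8, by omega⟩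
    rw [show (8 * k + 5) * (8 * k + 5) - 1 = (8 * k * k + 10 * k + 3) * 8 by ring,
        Int.mul_ediv_cancel _ (by norm_num),
        show 8 * k * k + 10 * k + 3 = 3 + 2 * (4 * k * k + 5 * k) by ring,
        Int.add_mul_emod_self_left]
    norm_num
  · rw [if_pos (Or.inr h)]
    obtain ⟨k, rfl⟩ : ∃ k, m = 8 * k + 7 := ⟨m / 8, by omega⟩
    rw [show (8 * k + 7) * (8 * k + 7) - 1 = (8 * k * k + 14 * k + 6) * 8 by ring,
        Int.mul_ediv_cancel _ (by norm_num),
        show 8 * k * k + 14 * k + 6 = 6 + 2 * (4 * k * k + 7 * k) by ring,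
        Int.add_mul_emod_self_left]
    norm_num

-- ===== VERDICT =====
theorem get_arf_spec : Claim_equal_get_arf := by
  intro p q _
  unfold Spec_get_arf
  rcases Int.emod_two_eq p with hp | hp <;> rcases Int.emod_two_eq q with hq | hq
  · -- both even
    rw [get_arf.eq_def]
    simp [get_arf_alt, hp, hq]
  · -- p even, q odd: m = q
    have hf := pv_arf_formula q hq
    have h8 : q % 8 = 1 ∨ q % 8 = 3 ∨ q % 8 = 5 ∨ q % 8 = 7 := by omega
    rw [get_arf.eq_def]
    rcases h8 with h8 | h8 | h8 | h8 <;>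
      simp [get_arf_alt, hp, hq, h8, hf]
  · -- p odd, q even: A recurses once; m = p
    have hf := pv_arf_formula p hp
    have h8 : p % 8 = 1 ∨ p % 8 = 3 ∨ p % 8 = 5 ∨ p % 8 = 7 := by omega
    have hq8 : q % 8 ≠ 1 ∧ q % 8 ≠ 3 ∧ q % 8 ≠ 5 ∧ q % 8 ≠ 7 := by omega
    rw [get_arf.eq_def, get_arf.eq_def]
    rcases h8 with h8 | h8 | h8 | h8 <;>
      simp [get_arf_alt, hp, hq, h8, hf, hq8.1, hq8.2.1, hq8.2.2.1, hq8.2.2.2]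
  · -- both odd: coefficient 1 - 1*1 = 0
    rw [get_arf.eq_def]
    simp [get_arf_alt, hp, hq]
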